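-- pv_equiv track=rewrite | github.com/bond-lab/NTUMC | scripts/addpinyin.py | _reading_tags
-- ===== SOURCE A (Python) =====
-- _XREF_PREFIXES = ("see ", "variant of ", "old variant of ",
--                    "erhua variant of ")
--
-- def _reading_tags(meaning):
--     """Classify a CEDICT meaning string into a set of tags.
--
--     Tags: ``surname-only``, ``used-in-only``, ``abbrev-only``, ``xref-only``.
--     A tag ending in ``-only`` means *all* real definitions fit that category.
--     """
--     defs = [d.strip() for d in meaning.split("/") if d.strip()]
--     if not defs:
--         return {"empty"}
--     tags = set()
--     if all(any(d.startswith(p) for p in _XREF_PREFIXES) for d in defs):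
--         tags.add("xref-only")
--         return tags
--     real = [d for d in defs if not any(d.startswith(p) for p in _XREF_PREFIXES)]
--     if not real:
--         tags.add("xref-only")
--         return tags
--     if all(d.startswith("surname ") for d in real):
--         tags.add("surname-only")
--     if all(d.lower().startswith("used in ") for d in real):
--         tags.add("used-in-only")
--     if all("abbr." in d.lower() for d in real):
--         tags.add("abbrev-only")
--     if all("(coll.)" in d for d in real):
--         tags.add("coll-only")
--     if all("(Tw)" in d or "Taiwan pr." in d for d in real):
--         tags.add("tw-only")
--     return tags
-- ===== SOURCE B (Python) =====
-- _XREF_PREFIXES = ("see ", "variant of ", "old variant of ",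
--                    "erhua variant of ")
--
-- _CATS = (
--     ("surname-only", lambda d: d.startswith("surname ")),
--     ("used-in-only", lambda d: d.lower().startswith("used in ")),
--     ("abbrev-only", lambda d: "abbr." in d.lower()),
--     ("coll-only", lambda d: "(coll.)" in d),
--     ("tw-only", lambda d: "(Tw)" in d or "Taiwan pr." in d),
-- )
--
-- def _classify(d):
--     """The set of category tags a single definition satisfies."""
--     return {tag for tag, pred in _CATS if pred(d)}
--
-- def _reading_tags(meaning):
--     defs = [d.strip() for d in meaning.split("/") if d.strip()]
--     if not defs:
--         return {"empty"}
--     real = [d for d in defs if not d.startswith(_XREF_PREFIXES)]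
--     if not real:
--         return {"xref-only"}
--     tags = _classify(real[0])
--     for d in real[1:]:
--         tags &= _classify(d)
--     return tags
-- ===== Notes on version B (the rewrite author's own statement) =====
-- stated objective: alternative
-- what changed: Inverts the traversal: instead of five per-tag all() scans over the definitions, B classifies each real definition into its own tag set (via a tag/predicate table) and intersects those sets; it also drops A's redundant first all-xref scan, subsumed by the empty-real check.
import Mathlib
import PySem

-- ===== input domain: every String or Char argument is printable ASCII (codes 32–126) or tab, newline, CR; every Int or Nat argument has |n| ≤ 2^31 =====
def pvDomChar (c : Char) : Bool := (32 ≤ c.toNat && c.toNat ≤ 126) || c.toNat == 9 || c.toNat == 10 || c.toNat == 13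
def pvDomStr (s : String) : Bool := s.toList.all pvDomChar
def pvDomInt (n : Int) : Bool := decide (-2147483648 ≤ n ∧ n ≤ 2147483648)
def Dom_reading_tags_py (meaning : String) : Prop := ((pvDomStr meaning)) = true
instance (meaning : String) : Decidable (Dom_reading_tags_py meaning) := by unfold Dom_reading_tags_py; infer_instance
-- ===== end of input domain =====

-- B inverts the traversal: it classifies each real definition into its own tag set and
-- intersects those sets, instead of A's five per-tag all() scans; same return values.

-- ===== PORT A =====
def pvXrefPrefixes : List String := ["see ", "variant of ", "old variant of ", "erhua variant of "]

def reading_tags_py (meaning : String) : List String :=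
  let defs := (((PySem.Str.split? meaning "/").getD []).filter
      (fun d => !(PySem.Str.strip d == ""))).map PySem.Str.strip
  if defs = [] then ["empty"]
  else
    let tags : PySem.Set String := PySem.Set.empty
    if defs.all (fun d => pvXrefPrefixes.any (fun p => PySem.Str.startswith d p)) then
      PySem.Set.add tags "xref-only"
    else
      let real := defs.filter (fun d => !(pvXrefPrefixes.any (fun p => PySem.Str.startswith d p)))
      if real = [] then PySem.Set.add tags "xref-only"
      else
        let tags := if real.all (fun d => PySem.Str.startswith d "surname ") then PySem.Set.add tags "surname-only" else tags
        let tags := if real.all (fun d => PySem.Str.startswith (PySem.Str.lower d) "used in ") then PySem.Set.add tags "used-in-only" else tags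
        let tags := if real.all (fun d => PySem.Str.isIn "abbr." (PySem.Str.lower d)) then PySem.Set.add tags "abbrev-only" else tags
        let tags := if real.all (fun d => PySem.Str.isIn "(coll.)" d) then PySem.Set.add tags "coll-only" else tags
        let tags := if real.all (fun d => PySem.Str.isIn "(Tw)" d || PySem.Str.isIn "Taiwan pr." d) then PySem.Set.add tags "tw-only" else tags
        tags

-- ===== PORT B =====
-- d.startswith(tuple) is the disjunction over the tuple's elements
def pvIsXref (d : String) : Bool := pvXrefPrefixes.any (fun p => PySem.Str.startswith d p)

-- the _CATS tag/predicate table of Source B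
def pvCats : List (String × (String → Bool)) :=
  [("surname-only", fun d => PySem.Str.startswith d "surname "),
   ("used-in-only", fun d => PySem.Str.startswith (PySem.Str.lower d) "used in "),
   ("abbrev-only", fun d => PySem.Str.isIn "abbr." (PySem.Str.lower d)),
   ("coll-only", fun d => PySem.Str.isIn "(coll.)" d),
   ("tw-only", fun d => PySem.Str.isIn "(Tw)" d || PySem.Str.isIn "Taiwan pr." d)]

-- _classify: the set of category tags one definition satisfies (a set comprehension)
def pvClassify (d : String) : PySem.Set String :=
  PySem.Set.ofList ((pvCats.filter (fun c => c.2 d)).map Prod.fst)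

def reading_tags_py_alt (meaning : String) : List String :=
  let defs := (((PySem.Str.split? meaning "/").getD []).filter
      (fun d => !(PySem.Str.strip d == ""))).map PySem.Str.strip
  if defs = [] then ["empty"]
  else
    let real := defs.filter (fun d => !(pvIsXref d))
    if real = [] then ["xref-only"]
    else
      (real.drop 1).foldl (fun t d => PySem.Set.inter t (pvClassify d))
        (pvClassify (real.headD ""))

-- ===== PRECONDITION & SPEC =====
def Spec_reading_tags_py (meaning : String) (out : List String) : Prop := out = reading_tags_py_alt meaning
instance (meaning : String) (out : List String) : Decidable (Spec_reading_tags_py meaning out) := by unfold Spec_reading_tags_py; infer_instance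

-- ===== CLAIM (what is proved, stated in full; the proofs are below) =====
def Claim_equal_reading_tags_py : Prop := ∀ (meaning : String), Dom_reading_tags_py meaning → Spec_reading_tags_py meaning (reading_tags_py meaning)

-- ===== LEMMAS AND PROOFS =====

-- proof helper: the selection of tags by five booleans, in the canonical order
def pvSel (b1 b2 b3 b4 b5 : Bool) : List String :=
  (if b1 then ["surname-only"] else []) ++ (if b2 then ["used-in-only"] else []) ++
  (if b3 then ["abbrev-only"] else []) ++ (if b4 then ["coll-only"] else []) ++
  (if b5 then ["tw-only"] else [])

def pvP1 (d : String) : Bool := PySem.Str.startswith d "surname "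
def pvP2 (d : String) : Bool := PySem.Str.startswith (PySem.Str.lower d) "used in "
def pvP3 (d : String) : Bool := PySem.Str.isIn "abbr." (PySem.Str.lower d)
def pvP4 (d : String) : Bool := PySem.Str.isIn "(coll.)" d
def pvP5 (d : String) : Bool := PySem.Str.isIn "(Tw)" d || PySem.Str.isIn "Taiwan pr." d

lemma pvClassify_eq_sel (d : String) :
    pvClassify d = pvSel (pvP1 d) (pvP2 d) (pvP3 d) (pvP4 d) (pvP5 d) := by
  cases h1 : pvP1 d <;> cases h2 : pvP2 d <;> cases h3 : pvP3 d <;>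
    cases h4 : pvP4 d <;> cases h5 : pvP5 d <;>
  · simp only [pvP1] at h1; simp only [pvP2] at h2; simp only [pvP3] at h3; simp only [pvP4] at h4; simp only [pvP5] at h5
    simp only [pvClassify, pvCats, List.filter, h1, h2, h3, h4, h5, pvSel]
    rfl

lemma pvInter_sel (b1 b2 b3 b4 b5 c1 c2 c3 c4 c5 : Bool) :
    PySem.Set.inter (pvSel b1 b2 b3 b4 b5) (pvSel c1 c2 c3 c4 c5)
      = pvSel (b1 && c1) (b2 && c2) (b3 && c3) (b4 && c4) (b5 && c5) := by
  revert b1 b2 b3 b4 b5 c1 c2 c3 c4 c5; decide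

lemma pvFold_inter (rs : List String) (b1 b2 b3 b4 b5 : Bool) :
    rs.foldl (fun t d => PySem.Set.inter t (pvClassify d)) (pvSel b1 b2 b3 b4 b5)
      = pvSel (b1 && rs.all pvP1) (b2 && rs.all pvP2) (b3 && rs.all pvP3)
              (b4 && rs.all pvP4) (b5 && rs.all pvP5) := by
  induction rs generalizing b1 b2 b3 b4 b5 with
  | nil => simp
  | cons x xs ih =>
    rw [List.foldl_cons, pvClassify_eq_sel, pvInter_sel, ih]
    simp [List.all_cons, Bool.and_assoc]

-- A's chain of conditional Set.add's over empty is exactly a pvSel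
lemma pvAdds_eq_sel (a1 a2 a3 a4 a5 : Bool) :
    (let t0 : PySem.Set String := PySem.Set.empty
     let t1 := if a1 then PySem.Set.add t0 "surname-only" else t0
     let t2 := if a2 then PySem.Set.add t1 "used-in-only" else t1
     let t3 := if a3 then PySem.Set.add t2 "abbrev-only" else t2
     let t4 := if a4 then PySem.Set.add t3 "coll-only" else t3
     if a5 then PySem.Set.add t4 "tw-only" else t4)
      = pvSel a1 a2 a3 a4 a5 := by
  revert a1 a2 a3 a4 a5; decide

-- A's first all-xref scan is exactly "real is empty"
lemma pvAll_iff_filter_nil (l : List String) :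
    l.all (fun d => pvXrefPrefixes.any (fun p => PySem.Str.startswith d p)) = true
      ↔ l.filter (fun d => !(pvIsXref d)) = [] := by
  simp [List.filter_eq_nil_iff, pvIsXref, List.all_eq_true]

-- ===== VERDICT (by name: the statement is the Claim_ definition above) =====
theorem reading_tags_py_spec : Claim_equal_reading_tags_py := by
  intro meaning _
  unfold Spec_reading_tags_py reading_tags_py reading_tags_py_alt
  simp only [pvIsXref]
  set defs := (((PySem.Str.split? meaning "/").getD []).filter
      (fun d => !(PySem.Str.strip d == ""))).map PySem.Str.strip with hdefs
  by_cases hd : defs = []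
  · simp [hd]
  · simp only [if_neg hd]
    by_cases hall : defs.all (fun d => pvXrefPrefixes.any (fun p => PySem.Str.startswith d p)) = true
    · have hreal : defs.filter (fun d => !(pvXrefPrefixes.any (fun p => PySem.Str.startswith d p))) = [] := by
        have := (pvAll_iff_filter_nil defs).mp hall
        simpa [pvIsXref] using this
      rw [if_pos hall, if_pos hreal]
      rfl
    · have hreal : ¬ defs.filter (fun d => !(pvXrefPrefixes.any (fun p => PySem.Str.startswith d p))) = [] := by
        intro h
        exact hall ((pvAll_iff_filter_nil defs).mpr (by simpa [pvIsXref] using h))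
      simp only [if_neg hall, if_neg hreal]
      set real := defs.filter (fun d => !(pvXrefPrefixes.any (fun p => PySem.Str.startswith d p))) with hr
      obtain ⟨r, rs, hcons⟩ := List.exists_cons_of_ne_nil hreal
      rw [hcons]
      have hA := pvAdds_eq_sel ((r :: rs).all (fun d => PySem.Str.startswith d "surname "))
        ((r :: rs).all (fun d => PySem.Str.startswith (PySem.Str.lower d) "used in "))
        ((r :: rs).all (fun d => PySem.Str.isIn "abbr." (PySem.Str.lower d)))
        ((r :: rs).all (fun d => PySem.Str.isIn "(coll.)" d))
        ((r :: rs).all (fun d => PySem.Str.isIn "(Tw)" d || PySem.Str.isIn "Taiwan pr." d))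
      simp only at hA
      rw [hA]
      simp only [List.headD_cons, List.drop_one, List.tail_cons]
      rw [pvClassify_eq_sel, pvFold_inter]
      simp only [List.all_cons]
      rfl
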